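-- pv_equiv track=rewrite | github.com/walidatorkh/python_crash_course | leetcode_marathon/palindrom_number.py | is_palindrome_int
-- ===== SOURCE A (Python) =====
-- def is_palindrome_int(x: int) -> bool:
--     if x < 0:
--         return False
--
--     new = 0
--     original = x
--     while x:
--         x, d = divmod(x, 10)
--         new = new * 10 + d
--     return new == original
-- ===== SOURCE B (Python) =====
-- def is_palindrome_int(x: int) -> bool:
--     if x < 0:
--         return False
--     s = str(x)
--     return s == s[::-1]
-- ===== Notes on version B (the rewrite author's own statement) =====
-- stated objective: idiomatic
-- what changed: Replaces the arithmetic divmod loop that builds the reversed number in an accumulator with the idiomatic string check s == s[::-1] on the decimal representation.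
import Mathlib
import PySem

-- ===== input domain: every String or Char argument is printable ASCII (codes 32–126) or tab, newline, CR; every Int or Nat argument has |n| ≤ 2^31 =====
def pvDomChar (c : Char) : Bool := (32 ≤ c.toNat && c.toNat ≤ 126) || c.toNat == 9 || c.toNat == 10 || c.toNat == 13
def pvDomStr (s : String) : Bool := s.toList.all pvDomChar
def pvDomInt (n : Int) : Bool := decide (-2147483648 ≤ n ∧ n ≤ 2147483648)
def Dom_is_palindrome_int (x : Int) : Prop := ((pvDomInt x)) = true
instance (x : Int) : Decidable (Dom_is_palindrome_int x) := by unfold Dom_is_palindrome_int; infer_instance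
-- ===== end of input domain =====

-- B replaces A's arithmetic divmod reversal loop with the idiomatic string check s == s[::-1]; same results, similar cost.


-- ===== PORT A =====
-- A's while loop: 'while x: x, d = divmod(x, 10); new = new*10 + d'.  The loop is only
-- reached after the 'x < 0' guard, so x ≥ 0 there and 'while x' tests 0 < x.
def pvLoopA (x new : Int) : Int :=
  if 0 < x then
    pvLoopA (PySem.Int.floordiv x 10) (new * 10 + PySem.Int.mod x 10)
  else new
termination_by x.toNat
decreasing_by
  rw [PySem.Int.floordiv_eq_ediv_of_pos (by omega : (0:Int) < 10)]
  omega

def is_palindrome_int (x : Int) : Bool :=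
  if x < 0 then false
  else
    -- new = 0; original = x; loop; return new == original
    decide (pvLoopA x 0 = x)

-- ===== PORT B =====
def is_palindrome_int_alt (x : Int) : Bool :=
  if x < 0 then false
  else
    let s := PySem.Int.toChars x          -- s = str(x)
    decide (some s = PySem.List.slice? s none none (-1))   -- s == s[::-1]

-- ===== PRECONDITION & SPEC =====
def Spec_is_palindrome_int (x : Int) (out : Bool) : Prop := out = is_palindrome_int_alt x
instance (x : Int) (out : Bool) : Decidable (Spec_is_palindrome_int x out) := by unfold Spec_is_palindrome_int; infer_instance

-- ===== CLAIM (what is proved, stated in full; the proofs are below) =====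
def Claim_equal_is_palindrome_int : Prop := ∀ (x : Int), Dom_is_palindrome_int x → Spec_is_palindrome_int x (is_palindrome_int x)

-- ===== LEMMAS AND PROOFS =====

-- A's loop folds the little-endian decimal digits into the accumulator (Nat version, cast).
theorem pvLoopA_eq_foldl (n : Nat) (a : Nat) :
    pvLoopA (n : Int) (a : Int)
      = (((Nat.digits 10 n).foldl (fun acc d => acc * 10 + d) a : Nat) : Int) := by
  induction n using Nat.strong_induction_on generalizing a with
  | _ n ih =>
    rw [pvLoopA]
    rcases Nat.eq_zero_or_pos n with h | h
    · simp [h]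
    · have h10 : (0:Int) < (n : Int) := by exact_mod_cast h
      have hfd : PySem.Int.floordiv (n:Int) 10 = ((n/10 : Nat) : Int) := by
        exact_mod_cast PySem.Int.floordiv_natCast n 10
      have hmd : PySem.Int.mod (n:Int) 10 = ((n%10 : Nat) : Int) := by
        exact_mod_cast PySem.Int.mod_natCast n 10
      rw [if_pos h10, hfd, hmd,
        show ((a : Int) * 10 + ((n % 10 : Nat) : Int)) = ((a * 10 + n % 10 : Nat) : Int) by push_cast; ring,
        ih (n / 10) (Nat.div_lt_self h (by omega)),
        Nat.digits_def' (by omega : 1 < 10) h]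
      simp

-- the Nat fold is ofDigits of the reversed list
theorem foldl_eq_ofDigits (l : List Nat) (a : Nat) :
    l.foldl (fun acc d => acc * 10 + d) a = Nat.ofDigits 10 l.reverse + a * 10 ^ l.length := by
  induction l generalizing a with
  | nil => simp
  | cons d l ih =>
    simp only [List.foldl_cons, List.reverse_cons, List.length_cons]
    rw [ih, Nat.ofDigits_append]
    simp
    ring

theorem digitChar_inj {a b : Nat} (ha : a < 10) (hb : b < 10)
    (h : a.digitChar = b.digitChar) : a = b := by
  interval_cases a <;> interval_cases b <;> simp_all [Nat.digitChar]

theorem map_digitChar_inj_aux : ∀ (l1 l2 : List Nat), (∀ e ∈ l1, e < 10) → (∀ e ∈ l2, e < 10) →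
    l1.map Nat.digitChar = l2.map Nat.digitChar → l1 = l2
  | [], [], _, _, _ => rfl
  | [], _ :: _, _, _, h => by simp at h
  | _ :: _, [], _, _, h => by simp at h
  | a :: l, b :: m, h1, h2, h => by
    simp only [List.map_cons, List.cons.injEq] at h
    have hab := digitChar_inj (h1 a (by simp)) (h2 b (by simp)) h.1
    have htl := map_digitChar_inj_aux l m (fun e he => h1 e (List.mem_cons_of_mem _ he))
      (fun e he => h2 e (List.mem_cons_of_mem _ he)) h.2
    simp [hab, htl]

theorem map_digitChar_eq_iff (l1 l2 : List Nat) (h1 : ∀ e ∈ l1, e < 10) (h2 : ∀ e ∈ l2, e < 10) :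
    l1.map Nat.digitChar = l2.map Nat.digitChar ↔ l1 = l2 :=
  ⟨map_digitChar_inj_aux l1 l2 h1 h2, fun h => by rw [h]⟩

-- Nat.toDigits writes the digit characters most-significant first (positive case)
theorem toDigitsCore_eq (fuel n : Nat) (ds : List Char) (hpos : 0 < n) (hfuel : n < fuel) :
    Nat.toDigitsCore 10 fuel n ds = ((Nat.digits 10 n).map Nat.digitChar).reverse ++ ds := by
  induction fuel generalizing n ds with
  | zero => omega
  | succ f ih =>
    simp only [Nat.toDigitsCore]
    rw [Nat.digits_def' (by omega : 1 < 10) hpos]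
    by_cases h : n / 10 = 0
    · rw [if_pos h, h]
      simp
    · rw [if_neg h, ih (n / 10) _ (by omega) (by omega)]
      simp

theorem toDigits_eq (n : Nat) (h : 0 < n) :
    Nat.toDigits 10 n = ((Nat.digits 10 n).map Nat.digitChar).reverse := by
  rw [Nat.toDigits, toDigitsCore_eq (n + 1) n [] h (by omega)]
  simp

-- the heart: the reversed-digits value equals n iff the digit list is a palindrome
theorem ofDigits_reverse_eq_iff (n : Nat) (h : 0 < n) :
    Nat.ofDigits 10 (Nat.digits 10 n).reverse = n ↔ (Nat.digits 10 n).reverse = Nat.digits 10 n := by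
  constructor
  · intro heq
    have hlt : ∀ e ∈ (Nat.digits 10 n).reverse, e < 10 := by
      intro e he; exact Nat.digits_lt_base (by omega) (List.mem_reverse.mp he)
    by_cases h0 : n % 10 = 0
    · -- n ends in 0 (and n > 0): the reversed value drops a leading digit, so it is < n
      exfalso
      rw [Nat.digits_def' (by omega : 1 < 10) h, h0] at heq
      simp only [List.reverse_cons] at heq
      rw [Nat.ofDigits_append] at heq
      simp only [Nat.ofDigits_singleton, Nat.mul_zero, Nat.add_zero] at heq
      have hsmall : Nat.ofDigits 10 (Nat.digits 10 (n / 10)).reverse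
          < 10 ^ (Nat.digits 10 (n / 10)).reverse.length := by
        apply Nat.ofDigits_lt_base_pow_length (by omega)
        intro e he; exact Nat.digits_lt_base (by omega) (List.mem_reverse.mp he)
      have hbig : 10 ^ (Nat.digits 10 n).length ≤ 10 * n :=
        Nat.base_pow_length_digits_le 10 n (by omega) (by omega)
      rw [Nat.digits_def' (by omega : 1 < 10) h, List.length_cons, pow_succ'] at hbig
      have : 10 ^ (Nat.digits 10 (n / 10)).length ≤ n := by omega
      simp only [List.length_reverse] at hsmall
      omega
    · -- n does not end in 0: digits ∘ ofDigits cancels on the reversed list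
      obtain ⟨t, ht⟩ : ∃ t, Nat.digits 10 n = n % 10 :: t :=
        ⟨_, Nat.digits_def' (by omega : 1 < 10) h⟩
      have hw : ∀ (hne' : (Nat.digits 10 n).reverse ≠ []),
          (Nat.digits 10 n).reverse.getLast hne' ≠ 0 := by
        intro hne'
        simp only [ht, List.getLast_reverse, List.head_cons]
        exact h0
      have hcan := Nat.digits_ofDigits 10 (by omega) _ hlt hw
      rw [heq] at hcan
      exact hcan.symm
  · intro hrev
    conv_rhs => rw [← Nat.ofDigits_digits 10 n]
    rw [hrev]

-- ===== VERDICT (by name: the statement is the Claim_ definition above) =====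
theorem is_palindrome_int_spec : Claim_equal_is_palindrome_int := by
  intro x _
  unfold Spec_is_palindrome_int is_palindrome_int is_palindrome_int_alt
  by_cases hneg : x < 0
  · simp [hneg]
  · rw [if_neg hneg, if_neg hneg]
    have hx : x = ((x.toNat : Nat) : Int) := by omega
    set n := x.toNat with hn
    simp only [PySem.List.slice?_none_none_neg_one, Option.some.injEq]
    rcases Nat.eq_zero_or_pos n with h0 | hpos
    · rw [hx, h0]
      rw [pvLoopA]
      norm_num
      decide
    · rw [hx, show (0:Int) = ((0:Nat):Int) by rfl, pvLoopA_eq_foldl n 0, foldl_eq_ofDigits]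
      have hs : PySem.Int.toChars ((n : Nat) : Int)
          = ((Nat.digits 10 n).map Nat.digitChar).reverse := by
        simp [PySem.Int.toChars, toDigits_eq n hpos]
      rw [hs]
      have hd : ∀ e ∈ Nat.digits 10 n, e < 10 := fun e he => Nat.digits_lt_base (by omega) he
      simp only [Nat.zero_mul, Nat.add_zero, Nat.cast_inj, List.reverse_reverse]
      rw [show ((Nat.digits 10 n).map Nat.digitChar).reverse
            = (Nat.digits 10 n).reverse.map Nat.digitChar by simp]
      simp only [decide_eq_decide]
      exact (ofDigits_reverse_eq_iff n hpos).trans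
        (map_digitChar_eq_iff (Nat.digits 10 n).reverse (Nat.digits 10 n)
          (fun e he => hd e (List.mem_reverse.mp he)) hd).symm
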